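-- pv_equiv track=rewrite | github.com/Mystic-Chief/DAA-Assignments | Assignment 5/Question_31.py | seats
-- ===== SOURCE A (Python) =====
-- def seats(A):
--     """
--     :type A: str
--     :rtype: int
--     """
--     occupied = [i for i, seat in enumerate(A) if seat == 'x']
--     if not occupied:
--         return 0
--
--     median = occupied[len(occupied) // 2]
--     moves = 0
--
--     for i, seat in enumerate(occupied):
--         moves += abs(seat - (median - (len(occupied) // 2 - i)))
--
--     return moves
-- ===== SOURCE B (Python) =====
-- def seats(A):
--     """
--     :type A: str
--     :rtype: int
--     """
--     occupied = [i for i, seat in enumerate(A) if seat == 'x']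
--     moves = 0
--     l, r = 0, len(occupied) - 1
--     while l < r:
--         moves += (occupied[r] - r) - (occupied[l] - l)
--         l += 1
--         r -= 1
--     return moves
-- ===== Notes on version B (the rewrite author's own statement) =====
-- stated objective: alternative
-- what changed: Two pointers converging from both ends accumulate the outermost-pair gaps (occupied[r]-r)-(occupied[l]-l), eliminating the median selection and the per-element absolute-deviation loop.
import Mathlib
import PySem

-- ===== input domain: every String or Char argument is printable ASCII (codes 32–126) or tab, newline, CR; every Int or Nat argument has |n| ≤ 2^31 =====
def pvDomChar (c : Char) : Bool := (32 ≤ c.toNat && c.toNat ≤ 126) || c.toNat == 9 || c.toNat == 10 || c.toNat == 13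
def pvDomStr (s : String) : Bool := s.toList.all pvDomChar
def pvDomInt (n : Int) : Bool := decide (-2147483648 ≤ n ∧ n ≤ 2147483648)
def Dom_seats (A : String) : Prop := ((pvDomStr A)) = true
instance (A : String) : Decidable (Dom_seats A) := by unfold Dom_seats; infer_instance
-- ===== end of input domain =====

-- B replaces A's median-based sum of absolute deviations by two pointers converging from both
-- ends that accumulate the outermost-pair gaps; proved to return the same value on every string.


-- ===== PORT A =====
def seats (A : String) : Int :=
  let occupied := ((PySem.List.enumerate A.toList).filter (fun p => p.2 == 'x')).map (fun p => p.1)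
  if occupied = [] then 0
  else
    -- occupied[len(occupied) // 2]: the index is always in range here (occupied ≠ []), so pyGetD is exact
    let median := PySem.List.pyGetD occupied (PySem.Int.floordiv (occupied.length : Int) 2) 0
    (PySem.List.enumerate occupied).foldl
      (fun moves p => moves + |p.2 - (median - (PySem.Int.floordiv (occupied.length : Int) 2 - p.1))|) 0

-- ===== PORT B =====
-- while l < r: moves += (occupied[r] - r) - (occupied[l] - l); l += 1; r -= 1
-- (while the loop runs, 0 ≤ l < r ≤ len - 1, so both indices are in range and getD is exact)
def seatsAltLoop (occ : List Int) (l r : Nat) (moves : Int) : Int :=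
  if l < r then
    seatsAltLoop occ (l + 1) (r - 1) (moves + ((occ.getD r 0 - (r : Int)) - (occ.getD l 0 - (l : Int))))
  else moves
termination_by r - l
decreasing_by omega

def seats_alt (A : String) : Int :=
  let occupied := ((PySem.List.enumerate A.toList).filter (fun p => p.2 == 'x')).map (fun p => p.1)
  seatsAltLoop occupied 0 (occupied.length - 1) 0

-- ===== PRECONDITION & SPEC =====
def Spec_seats (A : String) (out : Int) : Prop := out = seats_alt A
instance (A : String) (out : Int) : Decidable (Spec_seats A out) := by unfold Spec_seats; infer_instance

-- ===== CLAIM (what is proved, stated in full; the proofs are below) =====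
def Claim_equal_seats : Prop := ∀ (A : String), Dom_seats A → Spec_seats A (seats A)

-- ===== LEMMAS AND PROOFS =====

-- the deviation function both sides sum over: pvG occ i = occ[i] - i
def pvG (occ : List Int) (i : Nat) : Int := occ.getD i 0 - (i : Int)

-- B's loop accumulates the sum of outermost-pair gaps
lemma seatsAltLoop_eq (occ : List Int) : ∀ d l r m, r - l ≤ d →
    seatsAltLoop occ l r m =
      m + ∑ k ∈ Finset.range ((r - l + 1) / 2), (pvG occ (r - k) - pvG occ (l + k)) := by
  intro d
  induction d with
  | zero =>
    intro l r m h
    rw [seatsAltLoop]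
    have hlr : ¬ l < r := by omega
    simp [hlr]
    have : (r - l + 1) / 2 = 0 := by omega
    simp [this]
  | succ d ih =>
    intro l r m h
    rw [seatsAltLoop]
    by_cases hlr : l < r
    · simp only [if_pos hlr]
      rw [ih (l + 1) (r - 1) _ (by omega)]
      have hc : (r - l + 1) / 2 = (r - 1 - (l + 1) + 1) / 2 + 1 := by omega
      rw [hc, Finset.sum_range_succ']
      have hsum : ∑ k ∈ Finset.range ((r - 1 - (l + 1) + 1) / 2), (pvG occ (r - 1 - k) - pvG occ (l + 1 + k))
                = ∑ k ∈ Finset.range ((r - 1 - (l + 1) + 1) / 2), (pvG occ (r - (k + 1)) - pvG occ (l + (k + 1))) :=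
        Finset.sum_congr rfl (fun k _ => by
          rw [show r - 1 - k = r - (k + 1) by omega, show l + 1 + k = l + (k + 1) by omega])
      rw [hsum]
      simp only [pvG, Nat.add_zero, Nat.sub_zero]
      ring
    · simp only [if_neg hlr]
      have : (r - l + 1) / 2 = 0 := by omega
      simp [this]

-- a range sum folded into symmetric outer pairs plus the middle term
lemma sum_range_pairs : ∀ (n : Nat) (g : Nat → Int),
    ∑ i ∈ Finset.range n, g i =
      (∑ k ∈ Finset.range (n / 2), (g k + g (n - 1 - k))) +
        (if n % 2 = 1 then g (n / 2) else 0) := by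
  intro n
  induction n using Nat.strong_induction_on with
  | _ n ih =>
    intro g
    match n with
    | 0 => simp
    | 1 => simp
    | (m + 2) =>
      have h1 : ∑ i ∈ Finset.range (m + 2), g i
          = g 0 + (∑ i ∈ Finset.range m, g (i + 1)) + g (m + 1) := by
        rw [Finset.sum_range_succ, Finset.sum_range_succ']
        ring
      rw [h1, ih m (by omega) (fun i => g (i + 1))]
      have hd : (m + 2) / 2 = m / 2 + 1 := by omega
      have hm : (m + 2) % 2 = m % 2 := by omega
      rw [hd, hm, Finset.sum_range_succ']
      have hsum : ∑ k ∈ Finset.range (m / 2), (g (k + 1) + g (m + 2 - 1 - (k + 1)))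
          = ∑ k ∈ Finset.range (m / 2), (g (k + 1) + g (m - 1 - k + 1)) :=
        Finset.sum_congr rfl (fun k hk => by
          rw [show m + 2 - 1 - (k + 1) = m - k from by omega]
          congr 2
          have : k < m / 2 := Finset.mem_range.mp hk
          omega)
      rw [hsum]
      simp only [Nat.sub_zero]
      rw [show m + 2 - 1 = m + 1 from by omega]
      by_cases hp : m % 2 = 1 <;> simp [hp] <;> ring

-- pvG is monotone on any strictly increasing list
lemma pvG_mono_of_pairwise (occ : List Int) (hp : occ.Pairwise (· < ·)) :
    ∀ i j, i ≤ j → j < occ.length → pvG occ i ≤ pvG occ j := by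
  have hlt : ∀ i j, i < j → j < occ.length → occ.getD i 0 < occ.getD j 0 := by
    intro i j hij hj
    rw [List.getD_eq_getElem occ 0 (by omega), List.getD_eq_getElem occ 0 hj]
    exact List.pairwise_iff_getElem.mp hp i j _ hj hij
  intro i j hij hj
  induction j with
  | zero =>
    have h0 : i = 0 := by omega
    subst h0; exact le_refl _
  | succ j ihj =>
    rcases Nat.lt_or_ge i (j + 1) with h | h
    · have h1 : pvG occ i ≤ pvG occ j := by
        rcases Nat.eq_or_lt_of_le (Nat.le_of_lt_succ h) with he | hl
        · simp [he]
        · exact ihj (by omega) (by omega)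
      have h2 : pvG occ j ≤ pvG occ (j + 1) := by
        have := hlt j (j + 1) (by omega) hj
        simp only [pvG]
        push_cast
        omega
      exact le_trans h1 h2
    · have : i = j + 1 := by omega
      simp [this]

-- the occupied-seat indices are strictly increasing
lemma occ_pairwise (A : String) :
    (((PySem.List.enumerate A.toList).filter (fun p => p.2 == 'x')).map (fun p => p.1)).Pairwise (· < ·) :=
  List.Pairwise.map _ (fun _ _ h => h)
    (List.Pairwise.filter _ (PySem.List.pairwise_lt_enumerate A.toList 0))

-- A's fold is the sum of absolute deviations from pvG at the median index
lemma seatsA_sum (occ : List Int) :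
    (PySem.List.enumerate occ).foldl
      (fun moves p => moves + |p.2 - (PySem.List.pyGetD occ (PySem.Int.floordiv (occ.length : Int) 2) 0
        - (PySem.Int.floordiv (occ.length : Int) 2 - p.1))|) 0
    = ∑ i ∈ Finset.range occ.length, |pvG occ i - pvG occ (occ.length / 2)| := by
  have hfd : PySem.Int.floordiv ((occ.length : Int)) 2 = ((occ.length / 2 : Nat) : Int) := by
    exact_mod_cast PySem.Int.floordiv_natCast occ.length 2
  rw [PySem.List.enumerate_eq_map_pyRange occ 0, List.foldl_map, PySem.List.foldl_add]
  simp only [PySem.List.len_eq, PySem.List.pyRange_zero_nat, List.map_map, hfd,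
    PySem.List.pyGetD_natCast, zero_add]
  rw [show ∑ i ∈ Finset.range occ.length, |pvG occ i - pvG occ (occ.length / 2)|
        = ((List.range occ.length).map (fun i => |pvG occ i - pvG occ (occ.length / 2)|)).sum from rfl]
  congr 1
  apply List.map_congr_left
  intro k _
  simp only [Function.comp_apply, PySem.List.pyGetD_natCast, pvG]
  congr 1
  ring

-- ===== VERDICT (by name: the statement is the Claim_ definition above) =====
theorem seats_spec : Claim_equal_seats := by
  intro A _
  unfold Spec_seats seats seats_alt
  simp only []
  by_cases hne : ((PySem.List.enumerate A.toList).filter (fun p => p.2 == 'x')).map (fun p => p.1) = []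
  · simp only [hne, if_pos, List.length_nil]
    rw [seatsAltLoop]
    norm_num
  · set occ := ((PySem.List.enumerate A.toList).filter (fun p => p.2 == 'x')).map (fun p => p.1) with hocc
    rw [if_neg hne]
    have hn : 1 ≤ occ.length := List.length_pos_iff.mpr hne
    have hmono := pvG_mono_of_pairwise occ (hocc ▸ occ_pairwise A)
    rw [seatsA_sum occ, seatsAltLoop_eq occ occ.length 0 (occ.length - 1) 0 (by omega), zero_add]
    rw [show (occ.length - 1 - 0 + 1) / 2 = occ.length / 2 from by omega]
    rw [sum_range_pairs]
    have hmid : (if occ.length % 2 = 1 then |pvG occ (occ.length / 2) - pvG occ (occ.length / 2)| else 0) = 0 := by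
      split_ifs <;> simp
    rw [hmid, add_zero]
    apply Finset.sum_congr rfl
    intro k hk
    have hk2 : k < occ.length / 2 := Finset.mem_range.mp hk
    have h1 : pvG occ k ≤ pvG occ (occ.length / 2) := hmono k _ (by omega) (by omega)
    have h2 : pvG occ (occ.length / 2) ≤ pvG occ (occ.length - 1 - k) := hmono _ _ (by omega) (by omega)
    rw [abs_of_nonpos (by omega), abs_of_nonneg (by omega)]
    simp only [Nat.zero_add]
    ring
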